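-- pv_equiv track=rewrite | github.com/lacop/Thesis | figures/scripts/node_order.py | numtoname
-- ===== SOURCE A (Python) =====
-- def numtoname(i):
--     name = ''
--     while i > 1:
--         if i % 2 == 0:
--             name += 'L'
--         else:
--             name += 'R'
--         i //=2
--     name += 'T'
--     return name[::-1]
-- ===== SOURCE B (Python) =====
-- def numtoname(i):
--     if i <= 1:
--         return 'T'
--     return numtoname(i // 2) + ('L' if i % 2 == 0 else 'R')
-- ===== Notes on version B (the rewrite author's own statement) =====
-- stated objective: simpler
-- what changed: Replaced the accumulator while-loop plus final string reversal with a direct recursion that emits the path MSB-first, so no reversal and no loop state.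
import Mathlib
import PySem

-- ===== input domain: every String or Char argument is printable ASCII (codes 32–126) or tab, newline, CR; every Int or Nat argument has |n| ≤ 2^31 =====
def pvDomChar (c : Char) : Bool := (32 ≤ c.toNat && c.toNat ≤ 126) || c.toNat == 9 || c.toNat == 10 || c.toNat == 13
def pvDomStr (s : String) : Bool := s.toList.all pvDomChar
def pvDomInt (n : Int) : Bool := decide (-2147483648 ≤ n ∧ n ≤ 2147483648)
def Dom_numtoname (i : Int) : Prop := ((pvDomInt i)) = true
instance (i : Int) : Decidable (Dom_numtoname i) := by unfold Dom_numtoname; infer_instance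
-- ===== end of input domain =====

-- B replaces A's accumulator loop + final reversal with a direct MSB-first recursion (objective: simpler).

-- ===== PORT A =====
-- the while loop: accumulates LSB-first into `name`, then A reverses at the end
def numtonameLoop (i : Int) (name : String) : String :=
  if i > 1 then
    numtonameLoop (PySem.Int.floordiv i 2)
      (name ++ (if PySem.Int.mod i 2 = 0 then "L" else "R"))
  else name ++ "T"
termination_by i.toNat
decreasing_by
  have h2 : PySem.Int.floordiv i 2 = i / 2 := PySem.Int.floordiv_eq_ediv_of_pos (by norm_num)
  rw [h2]; omega

def numtoname (i : Int) : String :=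
  (PySem.Str.slice? (numtonameLoop i "") none none (-1)).getD ""  -- name[::-1]; step ≠ 0 so never none

-- ===== PORT B =====
def numtoname_alt (i : Int) : String :=
  if i ≤ 1 then "T"
  else numtoname_alt (PySem.Int.floordiv i 2) ++ (if PySem.Int.mod i 2 = 0 then "L" else "R")
termination_by i.toNat
decreasing_by
  have h2 : PySem.Int.floordiv i 2 = i / 2 := PySem.Int.floordiv_eq_ediv_of_pos (by norm_num)
  rw [h2]; omega

-- ===== PRECONDITION & SPEC =====
def Spec_numtoname (i : Int) (out : String) : Prop := out = numtoname_alt i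
instance (i : Int) (out : String) : Decidable (Spec_numtoname i out) := by unfold Spec_numtoname; infer_instance

-- ===== CLAIM (what is proved, stated in full; the proofs are below) =====
def Claim_equal_numtoname : Prop := ∀ (i : Int), Dom_numtoname i → Spec_numtoname i (numtoname i)

-- ===== LEMMAS AND PROOFS =====

-- the loop only appends to `name`
theorem numtonameLoop_append (i : Int) :
    ∀ name, numtonameLoop i name = name ++ numtonameLoop i "" := by
  induction i using numtoname_alt.induct with
  | case1 i h =>
    intro name
    rw [numtonameLoop, if_neg (by omega)]
    conv_rhs => rw [numtonameLoop, if_neg (by omega)]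
    simp
  | case2 i h ih =>
    intro name
    rw [numtonameLoop, if_pos (by omega), ih]
    conv_rhs => rw [numtonameLoop, if_pos (by omega), ih]
    simp [String.append_assoc]

theorem loop_reverse (i : Int) :
    (numtonameLoop i "").toList.reverse = (numtoname_alt i).toList := by
  induction i using numtoname_alt.induct with
  | case1 i h =>
    rw [numtonameLoop, if_neg (by omega), numtoname_alt, if_pos h]
    rfl
  | case2 i h ih =>
    rw [numtonameLoop, if_pos (by omega), numtoname_alt, if_neg h,
      numtonameLoop_append]
    cases hm : decide (PySem.Int.mod i 2 = 0) <;>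
      simp_all [String.toList_append]

theorem numtoname_spec_aux (i : Int) : numtoname i = numtoname_alt i := by
  rw [numtoname, PySem.Str.slice?_none_none_neg_one, Option.getD_some, loop_reverse,
    String.ofList_toList]

-- ===== VERDICT (by name: the statement is the Claim_ definition above) =====
theorem numtoname_spec : Claim_equal_numtoname := by
  intro i _
  exact numtoname_spec_aux i
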